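-- pv_equiv track=rewrite | github.com/phazarik/Run3crabSetup | checkStatusAlljobs.py | parse_crab_status_output
-- ===== SOURCE A (Python) =====
-- def parse_crab_status_output(output):
--     ### Initialize default values
--     idle, running, transferring, finished, failed = "-", "-", "-", "-", "-"
--     status = "-"
--
--     for line in output.splitlines():
--         if "Status on the scheduler:" in line: status = line.split("Status on the scheduler:")[-1].strip()
--         elif "running" in line:      running      = line.split("running")[-1].strip()
--         elif "transferring" in line: transferring = line.split("transferring")[-1].strip()
--         elif "idle" in line:         idle         = line.split("idle")[-1].strip()
--         elif "finished" in line:     finished     = line.split("finished")[-1].strip()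
--         elif "failed" in line:       failed       = line.split("finished")[-1].strip()
--     return idle, running, transferring, finished, status
-- ===== SOURCE B (Python) =====
-- def parse_crab_status_output(output):
--     lines = output.splitlines()
--     SCHED = "Status on the scheduler:"
--
--     def last_value(needle, higher=()):
--         # last line containing `needle` that no higher-priority needle claims
--         for line in reversed(lines):
--             if needle in line and not any(h in line for h in higher):
--                 return line.split(needle)[-1].strip()
--         return "-"
--
--     status       = last_value(SCHED)
--     running      = last_value("running", (SCHED,))
--     transferring = last_value("transferring", (SCHED, "running"))
--     idle         = last_value("idle", (SCHED, "running", "transferring"))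
--     finished     = last_value("finished", (SCHED, "running", "transferring", "idle"))
--     return idle, running, transferring, finished, status
-- ===== Notes on version B (the rewrite author's own statement) =====
-- stated objective: alternative
-- what changed: B is field-major instead of line-major: for each of the five returned fields it does a separate reversed early-exit scan for the last line containing that field's keyword and none of the higher-priority keywords, rather than A's single forward pass over all lines updating six locals through an if/elif chain.
import Mathlib
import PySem

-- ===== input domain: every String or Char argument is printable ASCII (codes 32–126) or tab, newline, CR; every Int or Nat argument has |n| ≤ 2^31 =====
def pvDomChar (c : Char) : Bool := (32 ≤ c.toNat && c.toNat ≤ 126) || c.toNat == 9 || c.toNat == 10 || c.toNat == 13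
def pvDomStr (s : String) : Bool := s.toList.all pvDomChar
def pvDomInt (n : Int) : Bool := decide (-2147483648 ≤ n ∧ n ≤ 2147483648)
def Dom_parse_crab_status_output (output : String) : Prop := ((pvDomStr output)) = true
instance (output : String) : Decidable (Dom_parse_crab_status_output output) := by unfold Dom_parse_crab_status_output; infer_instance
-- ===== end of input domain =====

-- B is field-major: one reversed early-exit scan per field with explicit higher-priority
-- exclusions, instead of A's single line-major pass maintaining all fields. Objective: alternative.

-- line.split(sep)[-1].strip()  (sep is a nonempty literal)
def pvLast (line sep : String) : String :=
  PySem.Str.strip (((PySem.Str.split? line sep).getD []).getLastD "")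

-- ===== PORT A =====
-- state: (idle, running, transferring, finished, failed, status)
def stepA (st : String × String × String × String × String × String) (line : String) :
    String × String × String × String × String × String :=
  let (idle, running, transferring, finished, failed, status) := st
  if PySem.Str.isIn "Status on the scheduler:" line then
    (idle, running, transferring, finished, failed, pvLast line "Status on the scheduler:")
  else if PySem.Str.isIn "running" line then
    (idle, pvLast line "running", transferring, finished, failed, status)
  else if PySem.Str.isIn "transferring" line then
    (idle, running, pvLast line "transferring", finished, failed, status)
  else if PySem.Str.isIn "idle" line then
    (pvLast line "idle", running, transferring, finished, failed, status)
  else if PySem.Str.isIn "finished" line then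
    (idle, running, transferring, pvLast line "finished", failed, status)
  else if PySem.Str.isIn "failed" line then
    (idle, running, transferring, finished, pvLast line "finished", status)
  else
    (idle, running, transferring, finished, failed, status)

def parse_crab_status_output (output : String) : String × String × String × String × String :=
  let st := (PySem.Str.splitlines output).foldl stepA ("-", "-", "-", "-", "-", "-")
  (st.1, st.2.1, st.2.2.1, st.2.2.2.1, st.2.2.2.2.2)

-- ===== PORT B =====
-- last line (scanning the reversed list) containing `needle` and no higher-priority needle
def lastValue : List String → String → List String → String
  | [], _, _ => "-"
  | line :: rest, needle, higher =>
      if PySem.Str.isIn needle line && !(higher.any (fun h => PySem.Str.isIn h line)) then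
        pvLast line needle
      else lastValue rest needle higher

def pvSched : String := "Status on the scheduler:"

def parse_crab_status_output_alt (output : String) : String × String × String × String × String :=
  let rl := (PySem.Str.splitlines output).reverse
  let status       := lastValue rl pvSched []
  let running      := lastValue rl "running" [pvSched]
  let transferring := lastValue rl "transferring" [pvSched, "running"]
  let idle         := lastValue rl "idle" [pvSched, "running", "transferring"]
  let finished     := lastValue rl "finished" [pvSched, "running", "transferring", "idle"]
  (idle, running, transferring, finished, status)

-- ===== PRECONDITION & SPEC =====
def Spec_parse_crab_status_output (output : String) (out : String × String × String × String × String) : Prop := out = parse_crab_status_output_alt output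
instance (output : String) (out : String × String × String × String × String) : Decidable (Spec_parse_crab_status_output output out) := by unfold Spec_parse_crab_status_output; infer_instance

-- ===== CLAIM (what is proved, stated in full; the proofs are below) =====
def Claim_equal_parse_crab_status_output : Prop := ∀ (output : String), Dom_parse_crab_status_output output → Spec_parse_crab_status_output output (parse_crab_status_output output)

-- ===== LEMMAS AND PROOFS =====

-- A's fold over any line list, characterised field by field by B's reversed scans
theorem foldl_stepA_eq (lines : List String) :
    (lines.foldl stepA ("-", "-", "-", "-", "-", "-")).1
        = lastValue lines.reverse "idle" [pvSched, "running", "transferring"]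
    ∧ (lines.foldl stepA ("-", "-", "-", "-", "-", "-")).2.1
        = lastValue lines.reverse "running" [pvSched]
    ∧ (lines.foldl stepA ("-", "-", "-", "-", "-", "-")).2.2.1
        = lastValue lines.reverse "transferring" [pvSched, "running"]
    ∧ (lines.foldl stepA ("-", "-", "-", "-", "-", "-")).2.2.2.1
        = lastValue lines.reverse "finished" [pvSched, "running", "transferring", "idle"]
    ∧ (lines.foldl stepA ("-", "-", "-", "-", "-", "-")).2.2.2.2.2
        = lastValue lines.reverse pvSched [] := by
  induction lines using List.reverseRecOn with
  | nil => simp [lastValue]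
  | append_singleton ls l ih =>
      obtain ⟨h1, h2, h3, h4, h5⟩ := ih
      simp only [List.foldl_append, List.foldl_cons, List.foldl_nil,
        List.reverse_append, List.reverse_cons, List.reverse_nil, List.nil_append,
        List.cons_append, lastValue, stepA]
      split_ifs <;> simp_all [List.any, pvSched]

-- ===== VERDICT (by name: the statement is the Claim_ definition above) =====
theorem parse_crab_status_output_spec : Claim_equal_parse_crab_status_output := by
  intro output _
  unfold Spec_parse_crab_status_output parse_crab_status_output parse_crab_status_output_alt
  obtain ⟨h1, h2, h3, h4, h5⟩ := foldl_stepA_eq (PySem.Str.splitlines output)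
  simp only []
  rw [h1, h2, h3, h4, h5]
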